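-- pv_equiv track=rewrite | github.com/JoseLGF/AoC | 2020/Python/day21/day21part2.py | calculateSafeIngredients
-- ===== SOURCE A (Python) =====
-- def calculateSafeIngredients(ingredients, cannotContain):
--     # For an ingredient to be safe, it must be an element of all allergens
--     # in the cannotContain dictionary
--     safeIngredients = []
--     for ingredient in ingredients:
--         isIngredientSafe = True
--         for allergenKey in cannotContain:
--             elements = cannotContain[allergenKey]
--             if not ingredient in elements:
--                 isIngredientSafe = False
--         if isIngredientSafe:
--             safeIngredients.append(ingredient)
--     return safeIngredients
-- ===== SOURCE B (Python) =====
-- def calculateSafeIngredients(ingredients, cannotContain):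
--     # Intersect all allergen candidate sets once, then test each ingredient
--     # against that single set instead of against every allergen list.
--     vals = list(cannotContain.values())
--     if not vals:
--         return list(ingredients)
--     common = set(vals[0])
--     for v in vals[1:]:
--         common.intersection_update(v)
--     return [i for i in ingredients if i in common]
-- ===== Notes on version B (the rewrite author's own statement) =====
-- stated objective: faster
-- what changed: B intersects all allergen candidate lists into one set first and then filters the ingredients by a single membership test, instead of A's nested scan of every allergen list (with Python 'in' on a list) per ingredient.
import Mathlib
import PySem

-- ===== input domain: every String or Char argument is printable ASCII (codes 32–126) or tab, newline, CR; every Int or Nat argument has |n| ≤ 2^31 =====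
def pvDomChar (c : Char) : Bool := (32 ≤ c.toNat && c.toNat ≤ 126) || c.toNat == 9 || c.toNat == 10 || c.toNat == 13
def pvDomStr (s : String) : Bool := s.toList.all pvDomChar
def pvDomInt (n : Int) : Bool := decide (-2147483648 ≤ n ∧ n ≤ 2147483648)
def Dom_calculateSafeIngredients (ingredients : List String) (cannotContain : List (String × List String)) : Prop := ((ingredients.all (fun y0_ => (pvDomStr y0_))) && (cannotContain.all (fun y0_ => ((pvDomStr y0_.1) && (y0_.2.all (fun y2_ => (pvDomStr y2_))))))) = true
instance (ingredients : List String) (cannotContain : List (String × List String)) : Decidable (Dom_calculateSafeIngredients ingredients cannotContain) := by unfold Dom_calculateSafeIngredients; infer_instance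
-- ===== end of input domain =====

-- B replaces A's per-ingredient scan of every allergen list with one precomputed
-- intersection set of all allergen lists, then a single membership filter (faster).
-- ===== PORT A =====
def calculateSafeIngredients (ingredients : List String) (cannotContain : List (String × List String)) : List String :=
  let d := PySem.Dict.ofList cannotContain
  ingredients.foldl (fun safeIngredients ingredient =>
    let isIngredientSafe := d.keys.foldl (fun b allergenKey =>
      let elements := d.getD allergenKey []
      if ingredient ∈ elements then b else false) true
    if isIngredientSafe then safeIngredients ++ [ingredient] else safeIngredients) []

-- ===== PORT B =====
def calculateSafeIngredients_alt (ingredients : List String) (cannotContain : List (String × List String)) : List String :=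
  let vals := (PySem.Dict.ofList cannotContain).values
  if vals = [] then ingredients
  else
    -- vals[0] / vals[1:] on a known-nonempty list
    let common : PySem.Set String :=
      vals.tail.foldl (fun s v => s.filter (fun x => decide (x ∈ v))) (PySem.Set.ofList (vals.headD []))
    ingredients.filter (fun i => PySem.Set.contains common i)

-- ===== PRECONDITION & SPEC =====
def Spec_calculateSafeIngredients (ingredients : List String) (cannotContain : List (String × List String)) (out : List String) : Prop := out = calculateSafeIngredients_alt ingredients cannotContain
instance (ingredients : List String) (cannotContain : List (String × List String)) (out : List String) : Decidable (Spec_calculateSafeIngredients ingredients cannotContain out) := by unfold Spec_calculateSafeIngredients; infer_instance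

-- ===== CLAIM (what is proved, stated in full; the proofs are below) =====
def Claim_equal_calculateSafeIngredients : Prop := ∀ (ingredients : List String) (cannotContain : List (String × List String)), Dom_calculateSafeIngredients ingredients cannotContain → Spec_calculateSafeIngredients ingredients cannotContain (calculateSafeIngredients ingredients cannotContain)

-- ===== LEMMAS AND PROOFS =====

-- A's inner loop over the allergen keys is an 'all' check.
theorem innerFold_eq_all (i : String) (d : PySem.Dict String (List String))
    (L : List String) (b : Bool) :
    L.foldl (fun b k => if i ∈ d.getD k [] then b else false) b
      = (b && L.all (fun k => decide (i ∈ d.getD k []))) := by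
  induction L generalizing b with
  | nil => simp
  | cons k L ih =>
    simp only [List.foldl_cons, List.all_cons, ih]
    by_cases h : i ∈ d.getD k [] <;> simp [h]

-- membership in B's intersection fold
theorem mem_interFold (i : String) (rest : List (List String)) (s : PySem.Set String) :
    i ∈ rest.foldl (fun s v => s.filter (fun x => decide (x ∈ v))) s
      ↔ i ∈ s ∧ ∀ v ∈ rest, i ∈ v := by
  induction rest generalizing s with
  | nil => simp
  | cons v rest ih =>
    simp only [List.foldl_cons, ih, List.mem_filter, decide_eq_true_eq]
    constructor
    · rintro ⟨⟨hs, hv⟩, hrest⟩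
      exact ⟨hs, fun w hw => by
        rcases List.mem_cons.mp hw with h | h
        · exact h ▸ hv
        · exact hrest w h⟩
    · rintro ⟨hs, hall⟩
      exact ⟨⟨hs, hall v (by simp)⟩, fun w hw => hall w (by simp [hw])⟩

-- ===== VERDICT (by name: the statement is the Claim_ definition above) =====
theorem calculateSafeIngredients_spec : Claim_equal_calculateSafeIngredients := by
  intro ingredients cannotContain _
  unfold Spec_calculateSafeIngredients calculateSafeIngredients calculateSafeIngredients_alt
  have hnd : (PySem.Dict.ofList cannotContain).keys.Nodup :=
    PySem.Dict.nodup_keys_ofList cannotContain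
  set d := PySem.Dict.ofList cannotContain with hd
  have hvals : d.values = d.keys.map (fun k => d.getD k []) :=
    PySem.Dict.values_eq_map_keys d hnd []
  -- A is a filter
  have hA : ingredients.foldl (fun safeIngredients ingredient =>
      let isIngredientSafe := d.keys.foldl (fun b allergenKey =>
        let elements := d.getD allergenKey []
        if ingredient ∈ elements then b else false) true
      if isIngredientSafe then safeIngredients ++ [ingredient] else safeIngredients) []
      = ingredients.filter (fun i => d.keys.all (fun k => decide (i ∈ d.getD k []))) := by
    have := PySem.List.foldl_append_if_eq_filter
      (l := ingredients) (acc := ([] : List String))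
      (p := fun i => d.keys.all (fun k => decide (i ∈ d.getD k [])))
    simp only [List.nil_append] at this
    rw [← this]
    apply PySem.List.foldl_congr_mem
    intro acc i _
    simp only [innerFold_eq_all, Bool.true_and]
  rw [hA]
  cases hv : d.values with
  | nil =>
    have hk : d.keys = [] := List.map_eq_nil_iff.mp (hvals ▸ hv)
    simp [hk, List.filter_true]
  | cons v0 rest =>
    simp only [List.tail_cons, List.headD_cons, reduceCtorEq, if_false]
    refine List.filter_congr ?_
    intro i _
    have hmem : i ∈ rest.foldl (fun s v => s.filter (fun x => decide (x ∈ v))) (PySem.Set.ofList v0)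
        ↔ ∀ k ∈ d.keys, i ∈ d.getD k [] := by
      rw [mem_interFold, PySem.Set.mem_ofList]
      have : (∀ v ∈ d.values, i ∈ v) ↔ ∀ k ∈ d.keys, i ∈ d.getD k [] := by
        rw [hvals]; simp
      rw [← this, hv]
      constructor
      · rintro ⟨h0, hr⟩ w hw
        rcases List.mem_cons.mp hw with h | h
        · exact h ▸ h0
        · exact hr w h
      · intro h
        exact ⟨h v0 (by simp), fun w hw => h w (by simp [hw])⟩
    have hc : PySem.Set.contains
        (rest.foldl (fun s v => s.filter (fun x => decide (x ∈ v))) (PySem.Set.ofList v0)) i = true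
        ↔ i ∈ rest.foldl (fun s v => s.filter (fun x => decide (x ∈ v))) (PySem.Set.ofList v0) :=
      PySem.Set.contains_iff _ _
    rw [Bool.eq_iff_iff, List.all_eq_true]
    simp only [decide_eq_true_eq]
    rw [hc, hmem]
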